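-- pv_equiv track=rewrite | github.com/mzfgnb/hws | 1.py | task9
-- ===== SOURCE A (Python) =====
-- def task9(A):
--     B = []
--     for row in A:
--         if row == row[::-1]:
--             B.append(1)
--         else:
--             B.append(0)
--     return B
-- ===== SOURCE B (Python) =====
-- def task9(A):
--     B = []
--     for row in A:
--         n = len(row)
--         if all(row[i] == row[n - 1 - i] for i in range(n // 2)):
--             B.append(1)
--         else:
--             B.append(0)
--     return B
-- ===== Notes on version B (the rewrite author's own statement) =====
-- stated objective: idiomatic
-- what changed: Replaces the reverse-and-compare palindrome test (which builds a reversed copy of each row) with an in-place two-pointer scan comparing mirrored positions over the first half of the row.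
import Mathlib
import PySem

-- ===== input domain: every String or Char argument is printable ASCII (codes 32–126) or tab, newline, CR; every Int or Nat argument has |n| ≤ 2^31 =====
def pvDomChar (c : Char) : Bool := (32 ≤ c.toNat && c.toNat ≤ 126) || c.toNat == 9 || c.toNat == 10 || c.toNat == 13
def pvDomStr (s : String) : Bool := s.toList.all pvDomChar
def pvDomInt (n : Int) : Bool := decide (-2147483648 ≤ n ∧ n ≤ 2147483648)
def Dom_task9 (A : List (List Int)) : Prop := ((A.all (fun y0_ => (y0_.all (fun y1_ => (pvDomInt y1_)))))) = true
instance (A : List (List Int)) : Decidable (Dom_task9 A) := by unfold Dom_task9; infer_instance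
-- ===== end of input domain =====

-- B replaces A's reverse-and-compare palindrome test with a two-pointer scan over the first
-- half of each row (idiomatic; no reversed copy). Return values agree on all inputs.

-- ===== PORT A =====
def task9 (A : List (List Int)) : List Int :=
  A.foldl (fun B row =>
    if PySem.List.slice? row none none (-1) = some row then B ++ [1] else B ++ [0]) []

-- ===== PORT B =====
-- all indices used are in range (0 ≤ i < n/2 ≤ n, and 0 ≤ n-1-i < n), so pyGetD's default is never taken
def task9_alt (A : List (List Int)) : List Int :=
  A.foldl (fun B row =>
    let n : Int := row.length
    if (PySem.List.pyRange 0 (PySem.Int.floordiv n 2) 1).all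
         (fun i => PySem.List.pyGetD row i 0 == PySem.List.pyGetD row (n - 1 - i) 0)
    then B ++ [1] else B ++ [0]) []

-- ===== PRECONDITION & SPEC =====
def Spec_task9 (A : List (List Int)) (out : List Int) : Prop := out = task9_alt A
instance (A : List (List Int)) (out : List Int) : Decidable (Spec_task9 A out) := by unfold Spec_task9; infer_instance

-- ===== CLAIM (what is proved, stated in full; the proofs are below) =====
def Claim_equal_task9 : Prop := ∀ (A : List (List Int)), Dom_task9 A → Spec_task9 A (task9 A)

-- ===== LEMMAS AND PROOFS =====

-- A's test, unfolded: row == row[::-1]  ↔  reverse = row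
theorem testA_iff (row : List Int) :
    (PySem.List.slice? row none none (-1) = some row) ↔ row.reverse = row := by
  rw [PySem.List.slice?_none_none_neg_one]
  simp

-- reverse = row ↔ all mirrored pairs over the first half agree
theorem getBang_eq (l : List Int) (k : Nat) (h : k < l.length) : l[k]! = l[k] := by
  simp [h]


theorem getElem_idx_congr (l : List Int) (a b : Nat) (ha : a < l.length) (hb : b < l.length)
    (h : a = b) : l[a]'ha = l[b]'hb := by subst h; rfl

theorem reverse_eq_iff_half (row : List Int) :
    row.reverse = row ↔
      ∀ k, k < row.length / 2 → row[k]! = row[row.length - 1 - k]! := by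
  constructor
  · intro h k hk
    have hk' : k < row.length := by omega
    have hk2 : row.length - 1 - k < row.length := by omega
    rw [getBang_eq row k hk', getBang_eq row _ hk2]
    have := congrArg (fun l => l[k]?) h
    simp only at this
    rw [List.getElem?_reverse hk'] at this
    simp only [List.getElem?_eq_getElem, hk', hk2] at this
    exact (Option.some.inj this).symm
  · intro h
    apply List.ext_getElem (by simp)
    intro i h1 h2
    rw [List.getElem_reverse]
    by_cases hi : i < row.length / 2
    · have := h i hi
      rw [getBang_eq row i h2, getBang_eq row _ (by omega)] at this
      exact this.symm
    · by_cases hj : row.length - 1 - i < row.length / 2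
      · have := h (row.length - 1 - i) hj
        rw [getBang_eq row _ (by omega), getBang_eq row _ (by omega)] at this
        exact this.trans (getElem_idx_congr row _ _ (by omega) h2 (by omega))
      · exact getElem_idx_congr row _ _ (by omega) h2 (by omega)

-- B's test, characterised the same way
theorem testB_iff (row : List Int) :
    ((PySem.List.pyRange 0 (PySem.Int.floordiv (row.length : Int) 2) 1).all
       (fun i => PySem.List.pyGetD row i 0 == PySem.List.pyGetD row ((row.length : Int) - 1 - i) 0) = true)
    ↔ ∀ k, k < row.length / 2 → row[k]! = row[row.length - 1 - k]! := by
  have hfd : PySem.Int.floordiv (row.length : Int) 2 = ((row.length / 2 : Nat) : Int) := by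
    simp [PySem.Int.floordiv, Int.fdiv_eq_ediv]
  rw [hfd, PySem.List.pyRange_zero_natCast]
  simp only [List.all_map, List.all_eq_true, List.mem_range, Function.comp]
  constructor
  · intro h k hk
    have := h k hk
    simp only [beq_iff_eq, PySem.List.pyGetD_natCast] at this
    have hsub : ((k:Int)) ≤ (row.length : Int) - 1 := by
      have : k < row.length := by omega
      omega
    have hcast : (row.length : Int) - 1 - (k:Int) = ((row.length - 1 - k : Nat) : Int) := by
      have : k < row.length := by omega
      omega
    rw [hcast, PySem.List.pyGetD_natCast] at this
    have hk' : k < row.length := by omega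
    have hk2 : row.length - 1 - k < row.length := by omega
    simpa [List.getD_eq_getElem?_getD, List.getElem?_eq_getElem, hk', hk2,
      List.getElem!_eq_getElem?_getD] using this
  · intro h k hk
    have := h k hk
    have hk' : k < row.length := by omega
    have hk2 : row.length - 1 - k < row.length := by omega
    have hcast : (row.length : Int) - 1 - (k:Int) = ((row.length - 1 - k : Nat) : Int) := by
      omega
    simp only [beq_iff_eq, PySem.List.pyGetD_natCast, hcast]
    simpa [List.getD_eq_getElem?_getD, List.getElem?_eq_getElem, hk', hk2,
      List.getElem!_eq_getElem?_getD] using this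

theorem tests_agree (row : List Int) :
    (if PySem.List.slice? row none none (-1) = some row then (1:Int) else 0)
      = (if (PySem.List.pyRange 0 (PySem.Int.floordiv (row.length : Int) 2) 1).all
           (fun i => PySem.List.pyGetD row i 0 == PySem.List.pyGetD row ((row.length : Int) - 1 - i) 0)
         then (1:Int) else 0) := by
  by_cases h : row.reverse = row
  · rw [if_pos ((testA_iff row).mpr h),
       if_pos ((testB_iff row).mpr ((reverse_eq_iff_half row).mp h))]
  · rw [if_neg (fun hc => h ((testA_iff row).mp hc)),
       if_neg (fun hc => h ((reverse_eq_iff_half row).mpr ((testB_iff row).mp hc)))]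

theorem foldl_eq (A : List (List Int)) (acc : List Int) :
    A.foldl (fun B row =>
      if PySem.List.slice? row none none (-1) = some row then B ++ [1] else B ++ [0]) acc
    = A.foldl (fun B row =>
      let n : Int := row.length
      if (PySem.List.pyRange 0 (PySem.Int.floordiv n 2) 1).all
           (fun i => PySem.List.pyGetD row i 0 == PySem.List.pyGetD row (n - 1 - i) 0)
      then B ++ [1] else B ++ [0]) acc := by
  induction A generalizing acc with
  | nil => rfl
  | cons row rest ih =>
    simp only [List.foldl_cons]
    have := tests_agree row
    split_ifs at this ⊢ <;> first | exact ih _ | simp_all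

-- ===== VERDICT (by name: the statement is the Claim_ definition above) =====
theorem task9_spec : Claim_equal_task9 := by
  intro A _
  unfold Spec_task9 task9 task9_alt
  exact foldl_eq A []
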